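-- pv_equiv track=rewrite | github.com/iMD10/MATH317 | polyDeflation.py | deflate_polynomial
-- ===== SOURCE A (Python) =====
-- def deflate_polynomial(coefficients, r):
--
--     n = len(coefficients)
--     q_coefficients = [0] * (n - 1)  # To store coefficients of q(x)
--     b = coefficients[-1]  # Start with the coefficient of the highest power term
--
--     for i in range(n - 2, -1, -1):
--         q_coefficients[i] = b
--         b = coefficients[i] + r * b
--
--     # p(r) is the final remainder (b from the last iteration)
--     p_r = b
--     return q_coefficients, p_r
-- ===== SOURCE B (Python) =====
-- def deflate_polynomial(coefficients, r):
--     # Divide and conquer: p = low + x^m * high. Deflate the high half by (x - r),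
--     # fold its remainder into the low half (low + [bh]) and deflate that; the
--     # quotient is the concatenation of the two partial quotients, the remainder
--     # is the one of the low half.
--     def go(cs):
--         n = len(cs)
--         if n == 1:
--             return [], cs[0]
--         if n == 2:
--             return [cs[1]], cs[0] + r * cs[1]
--         m = n // 2
--         qh, bh = go(cs[m:])
--         ql, bl = go(cs[:m] + [bh])
--         return ql + qh, bl
--     return go(coefficients)
-- ===== Notes on version B (the rewrite author's own statement) =====
-- stated objective: alternative
-- what changed: Replaces A's single backward Horner index loop with a divide-and-conquer synthetic division: split the polynomial at the midpoint, deflate the high half, fold its remainder into the low half and deflate that, concatenating the partial quotients.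
import Mathlib
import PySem

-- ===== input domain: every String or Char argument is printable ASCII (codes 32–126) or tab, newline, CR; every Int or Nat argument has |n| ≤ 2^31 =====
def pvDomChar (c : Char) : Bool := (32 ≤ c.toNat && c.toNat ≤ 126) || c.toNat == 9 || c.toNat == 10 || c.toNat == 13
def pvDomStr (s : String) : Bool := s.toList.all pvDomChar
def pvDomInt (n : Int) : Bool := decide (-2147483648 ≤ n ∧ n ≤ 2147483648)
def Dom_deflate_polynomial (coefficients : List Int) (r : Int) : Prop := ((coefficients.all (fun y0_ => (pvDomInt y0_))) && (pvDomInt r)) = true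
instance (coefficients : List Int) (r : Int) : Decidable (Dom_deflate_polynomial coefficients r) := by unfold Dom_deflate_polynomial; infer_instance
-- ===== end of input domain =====

-- B replaces A's single backward Horner index loop with a divide-and-conquer
-- synthetic division (split at the midpoint, deflate the high half, fold its
-- remainder into the low half, concatenate the quotients); equivalence is about
-- the return value on nonempty input.

-- ===== PORT A =====
-- literal port of A: preallocate q = [0]*(n-1), b = coefficients[-1],
-- then for i in range(n-2, -1, -1): q[i] = b; b = coefficients[i] + r*b
def deflate_polynomial (coefficients : List Int) (r : Int) : List Int × Int :=
  let n : Int := coefficients.length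
  let q : List Int := List.replicate (n - 1).toNat 0
  match PySem.List.pyGet? coefficients (-1) with   -- coefficients[-1]; none = IndexError, excluded by Pre_
  | none => ([], 0)
  | some b0 =>
    let st := (PySem.List.pyRange (n - 2) (-1) (-1)).foldl
      (fun (st : List Int × Int) i =>
        (st.1.set i.toNat st.2, PySem.List.pyGetD coefficients i 0 + r * st.2)) (q, b0)
    (st.1, st.2)

-- ===== PORT B =====
-- port of Source B's inner recursion go: base cases n = 1, n = 2, else split at
-- m = n // 2 (cs[m:] = drop m, cs[:m] = take m; exact since 0 ≤ m ≤ n).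
-- Source B's go diverges on [] (A raises IndexError there, outside Pre_); the port
-- returns ([], 0) on [].
def pvGo (r : Int) : List Int → List Int × Int
  | [] => ([], 0)
  | [c] => ([], c)
  | [c0, c1] => ([c1], c0 + r * c1)
  | c0 :: c1 :: c2 :: rest =>
    let cs := c0 :: c1 :: c2 :: rest
    let m := cs.length / 2
    let (qh, bh) := pvGo r (cs.drop m)
    let (ql, bl) := pvGo r (cs.take m ++ [bh])
    (ql ++ qh, bl)
termination_by cs => cs.length
decreasing_by
  · simp; omega
  · simp; omega

def deflate_polynomial_alt (coefficients : List Int) (r : Int) : List Int × Int :=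
  pvGo r coefficients

-- ===== PRECONDITION & SPEC =====
-- Pre_ excludes only the empty list, on which A raises IndexError (coefficients[-1]).
def Pre_deflate_polynomial (coefficients : List Int) (r : Int) : Prop := coefficients ≠ []
instance (coefficients : List Int) (r : Int) : Decidable (Pre_deflate_polynomial coefficients r) := by unfold Pre_deflate_polynomial; infer_instance
def pvWitness_deflate_polynomial : List Int × Int := ([2, -3, 1], 1)

def Spec_deflate_polynomial (coefficients : List Int) (r : Int) (out : List Int × Int) : Prop := out = deflate_polynomial_alt coefficients r
instance (coefficients : List Int) (r : Int) (out : List Int × Int) : Decidable (Spec_deflate_polynomial coefficients r out) := by unfold Spec_deflate_polynomial; infer_instance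

-- ===== CLAIM (what is proved, stated in full; the proofs are below) =====
def Claim_equal_deflate_polynomial : Prop := ∀ (coefficients : List Int) (r : Int), Dom_deflate_polynomial coefficients r → Pre_deflate_polynomial coefficients r → Spec_deflate_polynomial coefficients r (deflate_polynomial coefficients r)

-- ===== LEMMAS AND PROOFS =====

-- reference recurrence: structural (front) synthetic division
def pvH (r : Int) : List Int → List Int × Int
  | [] => ([], 0)
  | [c] => ([], c)
  | c :: t => ((pvH r t).2 :: (pvH r t).1, c + r * (pvH r t).2)

lemma pvH_cons (r c : Int) (xs : List Int) (h : xs ≠ []) :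
    pvH r (c :: xs) = ((pvH r xs).2 :: (pvH r xs).1, c + r * (pvH r xs).2) := by
  cases xs with
  | nil => exact absurd rfl h
  | cons a t => rfl

-- composition: deflating low ++ t = deflate t, fold its remainder into low, deflate that
lemma pvH_append (r : Int) (t : List Int) (ht : t ≠ []) :
    ∀ low : List Int,
      pvH r (low ++ t)
        = ((pvH r (low ++ [(pvH r t).2])).1 ++ (pvH r t).1,
           (pvH r (low ++ [(pvH r t).2])).2) := by
  intro low
  induction low with
  | nil => simp [pvH]
  | cons c low' ih =>
    have h1 : low' ++ t ≠ [] := by simp [ht]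
    have h2 : low' ++ [(pvH r t).2] ≠ [] := by simp
    rw [List.cons_append, pvH_cons r c _ h1, List.cons_append, pvH_cons r c _ h2, ih]
    simp

-- B's divide-and-conquer equals the reference recurrence
lemma pvGo_eq_pvH (r : Int) : ∀ (n : Nat) (cs : List Int), cs.length ≤ n → pvGo r cs = pvH r cs := by
  intro n
  induction n with
  | zero =>
    intro cs h
    have : cs = [] := by cases cs <;> simp_all
    simp [this, pvGo, pvH]
  | succ n ih =>
    intro cs h
    match cs with
    | [] => simp [pvGo, pvH]
    | [c] => simp [pvGo, pvH]
    | [c0, c1] => simp [pvGo, pvH]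
    | c0 :: c1 :: c2 :: rest =>
      rw [pvGo]
      have hlen : (c0 :: c1 :: c2 :: rest).length = rest.length + 3 := by simp
      set cs := c0 :: c1 :: c2 :: rest with hcs
      set m := cs.length / 2 with hm
      have hmlb : 1 ≤ m := by rw [hm, hlen]; omega
      have hmub : m + 1 < cs.length := by rw [hm] at *; rw [hlen] at *; omega
      have hdrop : (cs.drop m).length ≤ n := by
        rw [List.length_drop]; omega
      have htake : (cs.take m ++ [(pvH r (cs.drop m)).2]).length ≤ n := by
        simp [List.length_take]; omega
      have hdropne : cs.drop m ≠ [] := by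
        intro hc
        have := congrArg List.length hc
        simp [List.length_drop] at this
        omega
      simp only [ih _ hdrop]
      simp only [ih _ htake]
      rw [show pvH r cs = pvH r (cs.take m ++ cs.drop m) by rw [List.take_append_drop],
        pvH_append r (cs.drop m) hdropne (cs.take m)]

-- quotient entries / remainder of the backward loop, consuming the reversed tail
def pvQpart (r : Int) : List Int → Int → List Int
  | [], _ => []
  | c :: t, b => b :: pvQpart r t (c + r * b)

def pvBfin (r : Int) : List Int → Int → Int
  | [], b => b
  | c :: t, b => pvBfin r t (c + r * b)

lemma pvQpart_snoc (r a : Int) : ∀ (ds : List Int) (b : Int),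
    pvQpart r (ds ++ [a]) b = pvQpart r ds b ++ [pvBfin r ds b] := by
  intro ds
  induction ds with
  | nil => intro b; simp [pvQpart, pvBfin]
  | cons c t ih => intro b; simp [pvQpart, pvBfin, ih]

lemma pvBfin_snoc (r a : Int) : ∀ (ds : List Int) (b : Int),
    pvBfin r (ds ++ [a]) b = a + r * pvBfin r ds b := by
  intro ds
  induction ds with
  | nil => intro b; simp [pvBfin]
  | cons c t ih => intro b; simp [pvBfin, ih]

-- the reference recurrence in terms of the backward-loop quantities
lemma pvH_snoc (r : Int) : ∀ (t : List Int) (c : Int),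
    pvH r (t ++ [c]) = ((pvQpart r t.reverse c).reverse, pvBfin r t.reverse c) := by
  intro t
  induction t with
  | nil => intro c; simp [pvH, pvQpart, pvBfin]
  | cons a t' ih =>
    intro c
    have hne : t' ++ [c] ≠ [] := by simp
    rw [List.cons_append, pvH_cons r a _ hne, ih]
    simp [pvQpart_snoc, pvBfin_snoc]

lemma pvRange_neg_one_cons (a b : Int) (h : b < a) :
    PySem.List.pyRange a b (-1) = a :: PySem.List.pyRange (a - 1) b (-1) := by
  simp only [PySem.List.pyRange]
  norm_num
  have h1 : ¬ a < b := by omega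
  have h2 : (a - b).toNat = (a - 1 - b).toNat + 1 := by omega
  by_cases h3 : b < a - 1
  · simp [h, h3, h2, List.range_succ_eq_map, List.map_map, Function.comp]
    ring_nf
    exact fun _ _ => trivial
  · have h4 : a - 1 = b := by omega
    simp [h, h2, h4]

lemma pv_loopA (cs : List Int) (r : Int) :
    ∀ (m : Nat) (q : List Int) (b : Int), m ≤ q.length → m ≤ cs.length →
    (PySem.List.pyRange ((m : Int) - 1) (-1) (-1)).foldl
      (fun (st : List Int × Int) i =>
        (st.1.set i.toNat st.2, PySem.List.pyGetD cs i 0 + r * st.2)) (q, b)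
    = ((pvQpart r (cs.take m).reverse b).reverse ++ q.drop m,
       pvBfin r (cs.take m).reverse b) := by
  intro m
  induction m with
  | zero =>
    intro q b _ _
    have : PySem.List.pyRange (-1 : Int) (-1) (-1) = [] := by decide
    simp [this, pvQpart, pvBfin]
  | succ m ih =>
    intro q b hq hcs
    have hm : m < cs.length := by omega
    have hmq : m < q.length := by omega
    have hpeel : PySem.List.pyRange ((m : Int) + 1 - 1) (-1) (-1)
        = (m : Int) :: PySem.List.pyRange ((m : Int) - 1) (-1) (-1) := by
      have := pvRange_neg_one_cons (m : Int) (-1) (by omega)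
      simpa using this
    have hget : PySem.List.pyGetD cs (m : Int) 0 = cs[m] := by
      rw [PySem.List.pyGetD_natCast]
      simp [List.getD_eq_getElem?_getD, hm]
    have htake : (cs.take (m + 1)).reverse = cs[m] :: (cs.take m).reverse := by
      rw [List.take_add_one]
      simp [hm]
    have hdrop : (q.set m b).drop m = b :: q.drop (m + 1) := by
      rw [List.drop_eq_getElem_cons (by simpa using hmq), List.getElem_set_self,
        List.drop_set_of_lt (by omega)]
    push_cast
    rw [hpeel]
    simp only [List.foldl_cons, Int.toNat_natCast]
    rw [ih (q.set m b) (PySem.List.pyGetD cs (m : Int) 0 + r * b) (by simp; omega) (by omega)]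
    rw [hget, htake, hdrop]
    simp [pvQpart, pvBfin]

-- ===== VERDICT (by name: the statement is the Claim_ definition above) =====
theorem deflate_polynomial_spec : Claim_equal_deflate_polynomial := by
  intro cs r _ hpre
  unfold Spec_deflate_polynomial deflate_polynomial deflate_polynomial_alt
  have hne : cs ≠ [] := hpre
  have hget : PySem.List.pyGet? cs (-1) = some (cs.getLast hne) := by
    rw [PySem.List.pyGet?_neg_one, List.getLast?_eq_getLast_of_ne_nil hne]
  rw [hget]
  simp only []
  have hn1 : ((cs.length : Int) - 1).toNat = cs.length - 1 := by
    have := List.length_pos_of_ne_nil hne; omega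
  have hA := pv_loopA cs r (cs.length - 1) (List.replicate (cs.length - 1) 0) (cs.getLast hne)
      (by simp) (by omega)
  have hcast : ((cs.length - 1 : Nat) : Int) - 1 = (cs.length : Int) - 2 := by
    have := List.length_pos_of_ne_nil hne; omega
  rw [hcast] at hA
  have htake : cs.take (cs.length - 1) = cs.dropLast := by
    simp [List.dropLast_eq_take]
  have hB : pvGo r cs = pvH r cs := pvGo_eq_pvH r cs.length cs le_rfl
  have hsnoc := pvH_snoc r cs.dropLast (cs.getLast hne)
  rw [List.dropLast_append_getLast hne] at hsnoc
  rw [hB, hsnoc]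
  rw [hn1, hA, htake]
  simp

theorem deflate_polynomial_pre_witness :
    Dom_deflate_polynomial pvWitness_deflate_polynomial.1 pvWitness_deflate_polynomial.2 ∧
    Pre_deflate_polynomial pvWitness_deflate_polynomial.1 pvWitness_deflate_polynomial.2 := by
  constructor <;> decide
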